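-- pv_equiv track=rewrite | github.com/Encamera/EncameraCore | Sources/EncameraCore/scripts/app_store_localization/localize.py | find_existing_localization
-- ===== SOURCE A (Python) =====
-- def find_existing_localization(target_locale, existing_locales):
--     """Find existing localization with flexible matching."""
--     # Exact match first
--     if target_locale in existing_locales:
--         return existing_locales[target_locale]
--
--     # Case-insensitive match
--     for locale, data in existing_locales.items():
--         if locale.lower() == target_locale.lower():
--             return data
--
--     # Partial match (e.g., 'ja' matches 'ja-JP')
--     target_base = target_locale.split('-')[0].lower()
--     for locale, data in existing_locales.items():
--         locale_base = locale.split('-')[0].lower()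
--         if target_base == locale_base:
--             return data
--
--     return None
-- ===== SOURCE B (Python) =====
-- def find_existing_localization(target_locale, existing_locales):
--     """Single pass: rank each locale (0 exact, 1 case-insensitive, 2 same base),
--     keep the first entry with the lowest rank seen."""
--     t_lower = target_locale.lower()
--     t_base = target_locale.split('-')[0].lower()
--     best = None  # (priority, data)
--     for locale, data in existing_locales.items():
--         if locale == target_locale:
--             prio = 0
--         elif locale.lower() == t_lower:
--             prio = 1
--         elif t_base == locale.split('-')[0].lower():
--             prio = 2
--         else:
--             continue
--         if best is None or prio < best[0]:
--             best = (prio, data)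
--     return None if best is None else best[1]
-- ===== Notes on version B (the rewrite author's own statement) =====
-- stated objective: faster
-- what changed: Replaces A's three separate scans (exact lookup, case-insensitive loop, base-match loop) by one loop that ranks every entry 0/1/2 and keeps the first entry with the lowest rank, computing target_locale.lower() and its base once instead of on every iteration.
import Mathlib
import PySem

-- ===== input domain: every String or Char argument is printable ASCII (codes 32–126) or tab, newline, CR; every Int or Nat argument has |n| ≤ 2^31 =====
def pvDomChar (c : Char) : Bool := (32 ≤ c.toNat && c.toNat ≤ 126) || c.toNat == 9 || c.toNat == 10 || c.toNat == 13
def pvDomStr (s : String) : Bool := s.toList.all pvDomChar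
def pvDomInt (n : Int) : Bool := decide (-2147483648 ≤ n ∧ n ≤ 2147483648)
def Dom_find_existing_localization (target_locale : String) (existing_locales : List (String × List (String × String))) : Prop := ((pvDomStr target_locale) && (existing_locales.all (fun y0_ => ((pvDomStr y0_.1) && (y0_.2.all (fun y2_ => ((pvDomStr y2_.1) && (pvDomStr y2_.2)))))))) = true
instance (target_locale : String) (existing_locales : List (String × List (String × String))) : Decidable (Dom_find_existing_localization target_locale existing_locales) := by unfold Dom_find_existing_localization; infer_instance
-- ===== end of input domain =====

-- B replaces A's three successive scans (exact lookup, case-insensitive loop, base-match loop)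
-- by one loop that ranks each entry 0/1/2 and keeps the first entry with the lowest rank,
-- lowercasing the target once up front (objective: faster; measured).

-- shared helper: s.split('-')[0].lower()  ('-' is a nonempty separator, so split? is some
-- and the resulting list is nonempty: getD/headD defaults are never taken)
def pvBase (s : String) : String := PySem.Str.lower (((PySem.Str.split? s "-").getD []).headD "")

-- ===== PORT A =====
-- literal transliteration of A: exact-key membership + lookup, then two for-loops
-- returning on their first match (such a loop is List.find?).
def find_existing_localization (target_locale : String) (existing_locales : List (String × List (String × String))) : Option (List (String × String)) :=
  if existing_locales.any (fun p => p.1 == target_locale) then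
    (existing_locales.find? (fun p => p.1 == target_locale)).map (·.2)
  else
    match existing_locales.find? (fun p => PySem.Str.lower p.1 == PySem.Str.lower target_locale) with
    | some p => some p.2
    | none =>
      let target_base := pvBase target_locale
      match existing_locales.find? (fun p => target_base == pvBase p.1) with
      | some p => some p.2
      | none => none

-- ===== PORT B =====
-- transliteration of Source B: priority of one entry (0 exact / 1 case-insensitive / 2 same base)
def pvPrio (target_locale t_lower t_base : String) (locale : String) : Option Nat :=
  if locale == target_locale then some 0
  else if PySem.Str.lower locale == t_lower then some 1
  else if t_base == pvBase locale then some 2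
  else none

-- one iteration of Source B's loop: keep the best (priority, data) so far
def pvStep (target_locale t_lower t_base : String)
    (best : Option (Nat × List (String × String))) (p : String × List (String × String)) :
    Option (Nat × List (String × String)) :=
  match pvPrio target_locale t_lower t_base p.1, best with
  | none, b => b
  | some q, none => some (q, p.2)
  | some q, some (bq, bd) => if q < bq then some (q, p.2) else some (bq, bd)

def find_existing_localization_alt (target_locale : String) (existing_locales : List (String × List (String × String))) : Option (List (String × String)) :=
  let t_lower := PySem.Str.lower target_locale
  let t_base := pvBase target_locale
  (existing_locales.foldl (pvStep target_locale t_lower t_base) none).map (·.2)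

-- ===== PRECONDITION & SPEC =====
def Spec_find_existing_localization (target_locale : String) (existing_locales : List (String × List (String × String))) (out : Option (List (String × String))) : Prop := out = find_existing_localization_alt target_locale existing_locales
instance (target_locale : String) (existing_locales : List (String × List (String × String))) (out : Option (List (String × String))) : Decidable (Spec_find_existing_localization target_locale existing_locales out) := by unfold Spec_find_existing_localization; infer_instance

-- ===== CLAIM (what is proved, stated in full; the proofs are below) =====
def Claim_equal_find_existing_localization : Prop := ∀ (target_locale : String) (existing_locales : List (String × List (String × String))), Dom_find_existing_localization target_locale existing_locales → Spec_find_existing_localization target_locale existing_locales (find_existing_localization target_locale existing_locales)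

-- ===== LEMMAS AND PROOFS =====

-- merge of two "best so far" candidates: the earlier one wins ties
def pvMerge (a b : Option (Nat × List (String × String))) : Option (Nat × List (String × String)) :=
  match a, b with
  | none, b => b
  | some (q, d), none => some (q, d)
  | some (q, d), some (q', d') => if q' < q then some (q', d') else some (q, d)

theorem pvStep_eq_merge (t tl tb : String) (acc : Option (Nat × List (String × String)))
    (p : String × List (String × String)) :
    pvStep t tl tb acc p = pvMerge acc (pvStep t tl tb none p) := by
  rcases acc with _ | ⟨bq, bd⟩ <;> rcases hpr : pvPrio t tl tb p.1 with _ | q <;>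
    simp only [pvStep, pvMerge, hpr]

theorem pvMerge_assoc (a b c : Option (Nat × List (String × String))) :
    pvMerge (pvMerge a b) c = pvMerge a (pvMerge b c) := by
  rcases a with _ | ⟨qa, da⟩ <;> rcases b with _ | ⟨qb, db⟩ <;> rcases c with _ | ⟨qc, dc⟩ <;>
    simp only [pvMerge] <;> split_ifs <;>
      first | rfl | omega | (simp only [pvMerge]; split_ifs <;> first | rfl | omega)

theorem pvFoldl_merge (t tl tb : String) (xs : List (String × List (String × String)))
    (acc : Option (Nat × List (String × String))) :
    xs.foldl (pvStep t tl tb) acc = pvMerge acc (xs.foldl (pvStep t tl tb) none) := by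
  induction xs generalizing acc with
  | nil =>
    rcases acc with _ | ⟨q, d⟩ <;> rfl
  | cons p xs ih =>
    simp only [List.foldl_cons]
    rw [ih (pvStep t tl tb acc p), ih (pvStep t tl tb none p),
        pvStep_eq_merge t tl tb acc p, pvMerge_assoc]

-- the value A computes from the three first-match searches, as a plain function of them
def pvChoose (a b c : Option (String × List (String × String))) : Option (Nat × List (String × String)) :=
  match a with
  | some p => some (0, p.2)
  | none =>
    match b with
    | some p => some (1, p.2)
    | none =>
      match c with
      | some p => some (2, p.2)
      | none => none

theorem pvMerge_zero (d : List (String × String)) (x : Option (Nat × List (String × String))) :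
    pvMerge (some (0, d)) x = some (0, d) := by
  rcases x with _ | ⟨q, e⟩
  · rfl
  · simp [pvMerge]

-- characterisation of B's fold by the three first-match searches A performs
theorem pvFold_char (t : String) (xs : List (String × List (String × String))) :
    xs.foldl (pvStep t (PySem.Str.lower t) (pvBase t)) none =
      pvChoose (xs.find? (fun p => p.1 == t))
        (xs.find? (fun p => PySem.Str.lower p.1 == PySem.Str.lower t))
        (xs.find? (fun p => pvBase t == pvBase p.1)) := by
  induction xs with
  | nil => rfl
  | cons p xs ih =>
    simp only [List.foldl_cons]
    rw [pvFoldl_merge, ih]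
    rw [List.find?_cons, List.find?_cons, List.find?_cons]
    by_cases h0 : (p.1 == t) = true
    · have hstep : pvStep t (PySem.Str.lower t) (pvBase t) none p = some (0, p.2) := by
        simp [pvStep, pvPrio, h0]
      rw [hstep, pvMerge_zero]
      simp [pvChoose, h0]
    · by_cases h1 : (PySem.Str.lower p.1 == PySem.Str.lower t) = true
      · have hstep : pvStep t (PySem.Str.lower t) (pvBase t) none p = some (1, p.2) := by
          simp [pvStep, pvPrio, h0, h1]
        rw [hstep]
        simp only [h0, h1]
        rcases hf0 : xs.find? (fun p => p.1 == t) with _ | q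
        · simp only [hf0]
          rcases hf1 : xs.find? (fun p => PySem.Str.lower p.1 == PySem.Str.lower t) with _ | q
          · simp only [hf1]
            rcases hf2 : xs.find? (fun p => pvBase t == pvBase p.1) with _ | q <;>
              simp only [hf2] <;> rfl
          · simp only [hf1]; rfl
        · simp only [hf0]; rfl
      · by_cases h2 : (pvBase t == pvBase p.1) = true
        · have hstep : pvStep t (PySem.Str.lower t) (pvBase t) none p = some (2, p.2) := by
            simp [pvStep, pvPrio, h0, h1, h2]
          rw [hstep]
          simp only [h0, h1, h2]
          rcases hf0 : xs.find? (fun p => p.1 == t) with _ | q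
          · simp only [hf0]
            rcases hf1 : xs.find? (fun p => PySem.Str.lower p.1 == PySem.Str.lower t) with _ | q
            · simp only [hf1]
              rcases hf2 : xs.find? (fun p => pvBase t == pvBase p.1) with _ | q <;>
                simp only [hf2] <;> rfl
            · simp only [hf1]; rfl
          · simp only [hf0]; rfl
        · have hstep : pvStep t (PySem.Str.lower t) (pvBase t) none p = none := by
            simp [pvStep, pvPrio, h0, h1, h2]
          rw [hstep]
          simp only [h0, h1, h2]
          rcases hf0 : xs.find? (fun p => p.1 == t) with _ | q
          · simp only [hf0]
            rcases hf1 : xs.find? (fun p => PySem.Str.lower p.1 == PySem.Str.lower t) with _ | q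
            · simp only [hf1]
              rcases hf2 : xs.find? (fun p => pvBase t == pvBase p.1) with _ | q <;>
                simp only [hf2] <;> rfl
            · simp only [hf1]; rfl
          · simp only [hf0]; rfl

-- ===== VERDICT (by name: the statement is the Claim_ definition above) =====
theorem find_existing_localization_spec : Claim_equal_find_existing_localization := by
  intro t xs _
  unfold Spec_find_existing_localization
  simp only [find_existing_localization, find_existing_localization_alt]
  rw [pvFold_char, ← List.isSome_find? (f := fun p => p.1 == t) (xs := xs)]
  rcases hf0 : xs.find? (fun p => p.1 == t) with _ | q
  · simp only [hf0]
    rcases hf1 : xs.find? (fun p => PySem.Str.lower p.1 == PySem.Str.lower t) with _ | q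
    · simp only [hf1]
      rcases hf2 : xs.find? (fun p => pvBase t == pvBase p.1) with _ | q <;> simp only [hf2] <;> rfl
    · simp only [hf1]; rfl
  · simp only [hf0]; rfl
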